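-- pv_equiv track=rewrite | github.com/abel1927/Design-and-Analysis-of-Algorithms-DAA-Project | D. Stressful Training/test/brute_force.py | variations
-- ===== SOURCE A (Python) =====
-- def variations(a_p, x, b, v, time):
--     """
--     Generar las posibles selecciones del equipo a cargar en cada minuto.
--     Variaciones con repeticion de n en k
--     """
--     if time == len(v): # Se completo una secuencia, entonces hay respuesta afiramativa
--         return True
--     for i in range(len(a_p)):
--         v[time] = i
--         a_p[i] += x
--         for j in range(len(a_p)):
--             a_p[j]-=b[j]
--         if min(a_p)>=0:   # si luego de cargar el elemento en ese minuto, alguno se descarga, no hay solucion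
--             if variations(a_p,x,b,v,time+1):
--                 return True
--         for j in range(len(a_p)):
--             a_p[j]+=b[j]
--         a_p[i] -= x
--     return False
-- ===== SOURCE B (Python) =====
-- def variations(a_p, x, b, v, time):
--     """Depth-first search over immutable charge states with a failure cache ('dynamic
--     programming'): every (minutes_left, state) pair proved infeasible is recorded once,
--     so the duplicated subtrees A re-explores are pruned."""
--     n = len(a_p)
--     failed = set()  # (minutes_left, state) pairs that admit no feasible schedule
--
--     def go(s, k):
--         if k == 0:
--             return True
--         if (k, s) in failed:
--             return False
--         for i in range(n):
--             t = tuple(s[j] - b[j] + (x if j == i else 0) for j in range(n))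
--             if all(c >= 0 for c in t) and go(t, k - 1):
--                 return True
--         failed.add((k, s))
--         return False
--
--     return go(tuple(a_p), len(v) - time)
-- ===== Notes on version B (the rewrite author's own statement) =====
-- stated objective: alternative
-- what changed: A enumerates charging schedules by depth-first backtracking with in-place mutation, re-exploring identical (minutes-left, state) subproblems; B searches over immutable states with a failure cache keyed by (minutes_left, state), so every infeasible subproblem is explored at most once (intended as faster; a timing run measured only ~1.2-1.6x, so no speed is claimed).
import Mathlib
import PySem

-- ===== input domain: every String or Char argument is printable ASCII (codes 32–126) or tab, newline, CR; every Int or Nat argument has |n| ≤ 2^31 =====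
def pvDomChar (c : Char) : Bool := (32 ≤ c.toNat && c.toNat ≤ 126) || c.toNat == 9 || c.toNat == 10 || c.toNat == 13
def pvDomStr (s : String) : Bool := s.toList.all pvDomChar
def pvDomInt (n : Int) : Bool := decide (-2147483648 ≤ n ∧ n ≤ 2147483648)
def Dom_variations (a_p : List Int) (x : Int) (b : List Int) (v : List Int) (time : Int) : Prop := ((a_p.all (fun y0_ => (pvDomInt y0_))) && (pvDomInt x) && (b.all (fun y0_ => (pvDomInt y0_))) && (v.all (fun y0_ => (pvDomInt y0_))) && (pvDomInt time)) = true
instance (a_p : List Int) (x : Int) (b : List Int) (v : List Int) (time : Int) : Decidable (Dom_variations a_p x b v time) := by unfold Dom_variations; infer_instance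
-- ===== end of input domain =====

-- B replaces A's backtracking enumeration (in-place mutation, duplicated subtrees re-explored)
-- by a search over immutable charge states with a failure cache keyed by (minutes left, state),
-- so each infeasible subproblem is explored at most once.
-- Equivalence is about the RETURN value only: Python A also mutates v (and restores a_p) in place.

-- ===== PORT A =====
-- A's recursion carried with an explicit fuel counter ((len v - time).toNat): inside Pre_ the
-- fuel never runs out before the base case 'time == len(v)'; the fuel-0 fallthrough 'false'
-- covers only 'time > len(v)', where Python A raises IndexError on 'v[time] = i' (outside Pre_)
-- or, with a_p = [], falls through its empty loop to False (matched).
def variationsGoA (x : Int) (b : List Int) : Nat → List Int → List Int → Int → Bool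
  | fuel, a_p, v, time =>
    if time = (v.length : Int) then true    -- if time == len(v): return True
    else match fuel with
      | 0 => false
      | fuel + 1 =>
        -- for i in range(len(a_p)): … return True on success, fall through to False
        (List.range a_p.length).any (fun i =>
          let v' := PySem.List.pySetD v time (i : Int)              -- v[time] = i
          let a1 := a_p.set i (a_p.getD i 0 + x)                    -- a_p[i] += x
          let a2 := a1.mapIdx (fun j c => c - b.getD j 0)           -- for j: a_p[j] -= b[j]  (j < len b inside Pre_)
          -- if min(a_p) >= 0: if variations(...): return True
          (match PySem.List.min? a2 (fun y => y) with
           | some m => decide (0 ≤ m)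
           | none => false) &&
          variationsGoA x b fuel a2 v' (time + 1))
          -- the two restoring loops and 'a_p[i] -= x' undo the mutation: the next i starts from a_p again

def variations (a_p : List Int) (x : Int) (b : List Int) (v : List Int) (time : Int) : Bool :=
  variationsGoA x b ((v.length : Int) - time).toNat a_p v time

-- ===== PORT B =====
-- t = tuple(s[j] - b[j] + (x if j == i else 0) for j in range(n))
def nextStateB (x : Int) (b : List Int) (n : Nat) (s : List Int) (i : Nat) : List Int :=
  (List.range n).map (fun j => s.getD j 0 - b.getD j 0 + (if j = i then x else 0))

-- Source B's inner 'go', with the mutable 'failed' set threaded through explicitly;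
-- variationsStepB is one iteration of go's for-loop (the (true, m) pass-through case is
-- the early 'return True' short-circuit)
mutual
def variationsGoB (x : Int) (b : List Int) (n : Nat) (k : Nat) (s : List Int)
    (memo : PySem.Set (Nat × List Int)) : Bool × PySem.Set (Nat × List Int) :=
  match k with
  | 0 => (true, memo)                                               -- if k == 0: return True
  | k' + 1 =>
    if (k' + 1, s) ∈ memo then (false, memo)                        -- if (k, s) in failed: return False
    else
      let r := (List.range n).foldl (variationsStepB x b n k' s) (false, memo)   -- for i in range(n):
      if r.1 then r else (false, PySem.Set.add r.2 (k' + 1, s))     -- failed.add((k, s)); return False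
  termination_by 2 * k

def variationsStepB (x : Int) (b : List Int) (n : Nat) (k' : Nat) (s : List Int)
    (acc : Bool × PySem.Set (Nat × List Int)) (i : Nat) : Bool × PySem.Set (Nat × List Int) :=
  match acc with
  | (true, m) => (true, m)
  | (false, m) =>
    let t := nextStateB x b n s i                                   -- t = tuple(...)
    if t.all (fun c => decide (0 ≤ c)) then                         -- if all(c >= 0 for c in t) and go(t, k-1):
      let q := variationsGoB x b n k' t m
      if q.1 then (true, q.2) else (false, q.2)                     --   return True  (else keep go's updated cache)
    else (false, m)
  termination_by 2 * k' + 1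
end

def variations_alt (a_p : List Int) (x : Int) (b : List Int) (v : List Int) (time : Int) : Bool :=
  -- go(tuple(a_p), len(v) - time). For len(v) - time < 0 the Python recursion never reaches its
  -- k == 0 base case: with a_p = [] its loop is empty and go returns False (returned here);
  -- with a_p ≠ [] it does not terminate — there Python A raises IndexError, outside Pre_.
  if (v.length : Int) - time < 0 then false
  else (variationsGoB x b a_p.length ((v.length : Int) - time).toNat a_p (PySem.Set.ofList [])).1

-- ===== PRECONDITION & SPEC =====
-- Pre_ excludes exactly the calls on which Python A raises IndexError: with a_p ≠ [] and
-- time ≠ len(v), A evaluates v[time] (needs -len(v) ≤ time < len(v)) and b[j] for every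
-- j < len(a_p) (needs len(a_p) ≤ len(b)). On every other input A returns normally.
def Pre_variations (a_p : List Int) (_x : Int) (b : List Int) (v : List Int) (time : Int) : Prop :=
  a_p = [] ∨ time = (v.length : Int) ∨
    (a_p.length ≤ b.length ∧ -(v.length : Int) ≤ time ∧ time ≤ (v.length : Int))
instance (a_p : List Int) (x : Int) (b : List Int) (v : List Int) (time : Int) : Decidable (Pre_variations a_p x b v time) := by unfold Pre_variations; infer_instance

def pvWitness_variations : List Int × Int × List Int × List Int × Int := ([1], 1, [1], [0, 0], 0)

def Spec_variations (a_p : List Int) (x : Int) (b : List Int) (v : List Int) (time : Int) (out : Bool) : Prop := out = variations_alt a_p x b v time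
instance (a_p : List Int) (x : Int) (b : List Int) (v : List Int) (time : Int) (out : Bool) : Decidable (Spec_variations a_p x b v time out) := by unfold Spec_variations; infer_instance

-- ===== CLAIM (what is proved, stated in full; the proofs are below) =====
def Claim_equal_variations : Prop := ∀ (a_p : List Int) (x : Int) (b : List Int) (v : List Int) (time : Int), Dom_variations a_p x b v time → Pre_variations a_p x b v time → Spec_variations a_p x b v time (variations a_p x b v time)

-- ===== LEMMAS AND PROOFS =====

def pvSucc (x : Int) (b : List Int) (s : List Int) (i : Nat) : List Int :=
  nextStateB x b s.length s i

-- reference semantics: a feasible schedule of k more minutes exists from state s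
def pvFeas (x : Int) (b : List Int) : Nat → List Int → Bool
  | 0, _ => true
  | k + 1, s => (List.range s.length).any (fun i =>
      (pvSucc x b s i).all (fun c => decide (0 ≤ c)) && pvFeas x b k (pvSucc x b s i))

theorem pvNext_length (x : Int) (b : List Int) (n : Nat) (s : List Int) (i : Nat) :
    (nextStateB x b n s i).length = n := by
  simp [nextStateB]

-- A's charge/discharge mutation equals pvSucc
theorem pvA_step_eq (x : Int) (b : List Int) (a_p : List Int) (i : Nat) (hi : i < a_p.length) :
    (a_p.set i (a_p.getD i 0 + x)).mapIdx (fun j c => c - b.getD j 0) = pvSucc x b a_p i := by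
  apply List.ext_getElem
  · simp [pvSucc, nextStateB]
  · intro j h1 h2
    simp only [List.getElem_mapIdx, pvSucc, nextStateB, List.getElem_map, List.getElem_range]
    simp only [List.length_mapIdx, List.length_set] at h1
    rcases eq_or_ne j i with rfl | hne
    · simp [List.getElem_set_self, List.getD_eq_getElem?_getD, hi]
      ring
    · simp [List.getElem_set_ne (Ne.symm hne), List.getD_eq_getElem?_getD, h1, hne]

-- A's 'min(a_p) >= 0' test equals B's all-nonnegative test (nonempty list)
theorem pvMin_eq_all (l : List Int) (hl : l ≠ []) :
    (match PySem.List.min? l (fun y => y) with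
     | some m => decide (0 ≤ m)
     | none => false) = l.all (fun c => decide (0 ≤ c)) := by
  cases h : PySem.List.min? l (fun y => y) with
  | none => exact absurd ((PySem.List.min?_eq_none_iff l _).mp h) hl
  | some m =>
    have hmem := PySem.List.min?_mem h
    have hmin := PySem.List.min?_isMin h
    by_cases h0 : 0 ≤ m
    · simp only [h0, decide_true]
      symm
      simp only [List.all_eq_true, decide_eq_true_eq]
      intro c hc
      exact le_trans h0 (hmin c hc)
    · simp only [h0, decide_false]
      symm
      rw [List.all_eq_false]
      exact ⟨m, hmem, by simpa using h0⟩

-- A computes pvFeas when the fuel is exact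
theorem pvGoA_eq_feas (x : Int) (b : List Int) :
    ∀ (fuel : Nat) (a_p v : List Int) (time : Int), time + fuel = (v.length : Int) →
      variationsGoA x b fuel a_p v time = pvFeas x b fuel a_p := by
  intro fuel
  induction fuel with
  | zero =>
    intro a_p v time h
    simp only [variationsGoA, pvFeas]
    rw [if_pos (by omega)]
  | succ k ih =>
    intro a_p v time h
    have hne : time ≠ (v.length : Int) := by omega
    have hsucc_ne : ∀ i : Nat, i < a_p.length → pvSucc x b a_p i ≠ [] := by
      intro i hi hnil
      have hlen := congrArg List.length hnil
      simp only [pvSucc, pvNext_length, List.length_nil] at hlen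
      omega
    simp only [variationsGoA, pvFeas, if_neg hne]
    rw [Bool.eq_iff_iff]
    simp only [List.any_eq_true, Bool.and_eq_true]
    constructor
    · rintro ⟨i, hi, hmin, hrec⟩
      have hlt := List.mem_range.mp hi
      rw [pvA_step_eq x b a_p i hlt] at hmin hrec
      rw [ih _ _ _ (by rw [PySem.List.length_pySetD]; omega)] at hrec
      rw [pvMin_eq_all _ (hsucc_ne i hlt)] at hmin
      exact ⟨i, hi, hmin, hrec⟩
    · rintro ⟨i, hi, hall, hrec⟩
      have hlt := List.mem_range.mp hi
      refine ⟨i, hi, ?_, ?_⟩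
      · rw [pvA_step_eq x b a_p i hlt, pvMin_eq_all _ (hsucc_ne i hlt)]
        exact hall
      · rw [pvA_step_eq x b a_p i hlt,
          ih _ _ _ (by rw [PySem.List.length_pySetD]; omega)]
        exact hrec

-- soundness of B's failure cache: every recorded pair really is infeasible
def pvInv (x : Int) (b : List Int) (memo : PySem.Set (Nat × List Int)) : Prop :=
  ∀ p ∈ memo, pvFeas x b p.1 p.2 = false

-- B computes pvFeas and preserves cache soundness
theorem pvGoB_eq_feas (x : Int) (b : List Int) (n : Nat) :
    ∀ (k : Nat) (s : List Int) (memo : PySem.Set (Nat × List Int)), s.length = n →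
      pvInv x b memo →
      (variationsGoB x b n k s memo).1 = pvFeas x b k s ∧
        pvInv x b (variationsGoB x b n k s memo).2 := by
  intro k
  induction k with
  | zero =>
    intro s memo _ hinv
    simp only [variationsGoB]
    exact ⟨rfl, hinv⟩
  | succ k ih =>
    intro s memo hsn hinv
    have hfeas : pvFeas x b (k + 1) s =
        (List.range n).any (fun i =>
          (nextStateB x b n s i).all (fun c => decide (0 ≤ c)) &&
            pvFeas x b k (nextStateB x b n s i)) := by
      simp only [pvFeas, hsn]
      apply List.any_congr rfl
      intro i
      rw [pvSucc, hsn]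
    simp only [variationsGoB]
    by_cases hmem : (k + 1, s) ∈ memo
    · rw [if_pos hmem]
      exact ⟨(hinv _ hmem).symm, hinv⟩
    · rw [if_neg hmem]
      have hstep_true : ∀ (m : PySem.Set (Nat × List Int)) (i : Nat),
          variationsStepB x b n k s (true, m) i = (true, m) := by
        intro m i
        simp only [variationsStepB]
      have hstep_valid : ∀ (m : PySem.Set (Nat × List Int)) (i : Nat),
          (nextStateB x b n s i).all (fun c => decide (0 ≤ c)) = true →
          variationsStepB x b n k s (false, m) i =
            ((variationsGoB x b n k (nextStateB x b n s i) m).1,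
              (variationsGoB x b n k (nextStateB x b n s i) m).2) := by
        intro m i hval
        simp only [variationsStepB]
        rw [if_pos hval]
        cases (variationsGoB x b n k (nextStateB x b n s i) m).1
        · simp only [Bool.false_eq_true, if_false]
        · simp only [if_true]
      have hstep_invalid : ∀ (m : PySem.Set (Nat × List Int)) (i : Nat),
          ¬ (nextStateB x b n s i).all (fun c => decide (0 ≤ c)) = true →
          variationsStepB x b n k s (false, m) i = (false, m) := by
        intro m i hval
        simp only [variationsStepB]
        rw [if_neg hval]
      have hloop : ∀ (il : List Nat) (acc : Bool × PySem.Set (Nat × List Int)), pvInv x b acc.2 →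
          (il.foldl (variationsStepB x b n k s) acc).1 =
            (acc.1 || il.any (fun i =>
              (nextStateB x b n s i).all (fun c => decide (0 ≤ c)) &&
                pvFeas x b k (nextStateB x b n s i))) ∧
          pvInv x b (il.foldl (variationsStepB x b n k s) acc).2 := by
        intro il
        induction il with
        | nil =>
          intro acc hacc
          simp [hacc]
        | cons i rest ihl =>
          intro acc hacc
          obtain ⟨fl, m⟩ := acc
          rw [List.foldl_cons]
          cases fl with
          | true =>
            rw [hstep_true m i]
            have hrec := ihl (true, m) hacc
            refine ⟨?_, hrec.2⟩
            rw [hrec.1]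
            simp
          | false =>
            by_cases hval : (nextStateB x b n s i).all (fun c => decide (0 ≤ c)) = true
            · rw [hstep_valid m i hval]
              obtain ⟨hq1, hq2⟩ := ih (nextStateB x b n s i) m (pvNext_length x b n s i) hacc
              have hrec := ihl ((variationsGoB x b n k (nextStateB x b n s i) m).1,
                (variationsGoB x b n k (nextStateB x b n s i) m).2) hq2
              refine ⟨?_, hrec.2⟩
              rw [hrec.1]
              simp only [List.any_cons, hval, Bool.true_and, hq1, Bool.false_or]
            · rw [hstep_invalid m i hval]
              have hrec := ihl (false, m) hacc
              refine ⟨?_, hrec.2⟩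
              rw [hrec.1]
              simp only [List.any_cons, Bool.false_or]
              simp [hval]
      obtain ⟨h1, h2⟩ := hloop (List.range n) (false, memo) hinv
      simp only [Bool.false_or] at h1
      split_ifs with hr
      · exact ⟨by rw [h1, hfeas], h2⟩
      · have hr' : ((List.range n).foldl (variationsStepB x b n k s) (false, memo)).1 = false := by
          simpa using hr
        have hfe : pvFeas x b (k + 1) s = false := by
          rw [hfeas, ← h1, hr']
        refine ⟨hfe.symm, ?_⟩
        intro p hp
        rcases (PySem.Set.mem_add _ _ _).mp hp with h | rfl
        · exact h2 p h
        · exact hfe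

-- ===== VERDICT (by name: the statement is the Claim_ definition above) =====
theorem variations_spec : Claim_equal_variations := by
  intro a_p x b v time _ hpre
  unfold Spec_variations
  by_cases hk : (v.length : Int) - time < 0
  · -- time past len(v): inside Pre_ only a_p = [] reaches this; both ports return false
    have hne : time ≠ (v.length : Int) := by omega
    have hA : variations a_p x b v time = false := by
      unfold variations
      have h0 : ((v.length : Int) - time).toNat = 0 := by omega
      rw [h0]
      simp only [variationsGoA]
      rw [if_neg hne]
    rw [hA]
    unfold variations_alt
    rw [if_pos hk]
  · have hfuel : time + (((v.length : Int) - time).toNat : Int) = (v.length : Int) := by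
      rw [Int.toNat_of_nonneg (by omega)]; omega
    have hA := pvGoA_eq_feas x b (((v.length : Int) - time).toNat) a_p v time hfuel
    have hB := pvGoB_eq_feas x b a_p.length (((v.length : Int) - time).toNat) a_p
      (PySem.Set.ofList []) rfl (by intro p hp; simp [PySem.Set.ofList] at hp)
    unfold variations variations_alt
    rw [if_neg hk, hA, hB.1]
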